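-- pv_equiv track=rewrite | github.com/marcospcruz/scripts_python | sgmp_traffic_report.py | extraiValorColuna
-- ===== SOURCE A (Python) =====
-- EOL_CHAR="\n"
--
-- def extraiValorColuna(separador,indiceColuna,string):
-- 	initPosicao=0
-- 	stringTemp=''
-- 	coluna=1
-- 	for caractere in string:
--
-- 		if caractere==separador or caractere==EOL_CHAR:
-- 			if indiceColuna==coluna:
-- 				return stringTemp
-- 			coluna+=1
-- 			stringTemp=''
-- 			continue
--
-- 		stringTemp+=caractere
-- ===== SOURCE B (Python) =====
-- EOL_CHAR = "\n"
--
-- def extraiValorColuna(separador, indiceColuna, string):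
--     # Normalize every separator character to EOL, split once, drop the
--     # unterminated trailing segment, then index.
--     normalized = "".join(EOL_CHAR if c == separador else c for c in string)
--     fields = normalized.split(EOL_CHAR)[:-1]
--     if 1 <= indiceColuna <= len(fields):
--         return fields[indiceColuna - 1]
--     return None
-- ===== Notes on version B (the rewrite author's own statement) =====
-- stated objective: idiomatic
-- what changed: Replaced A's char-by-char accumulator loop with early return by a one-shot pipeline: normalize every separator character to the EOL character, split the string once, drop the unterminated trailing segment, and index into the resulting field list.
import Mathlib
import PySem

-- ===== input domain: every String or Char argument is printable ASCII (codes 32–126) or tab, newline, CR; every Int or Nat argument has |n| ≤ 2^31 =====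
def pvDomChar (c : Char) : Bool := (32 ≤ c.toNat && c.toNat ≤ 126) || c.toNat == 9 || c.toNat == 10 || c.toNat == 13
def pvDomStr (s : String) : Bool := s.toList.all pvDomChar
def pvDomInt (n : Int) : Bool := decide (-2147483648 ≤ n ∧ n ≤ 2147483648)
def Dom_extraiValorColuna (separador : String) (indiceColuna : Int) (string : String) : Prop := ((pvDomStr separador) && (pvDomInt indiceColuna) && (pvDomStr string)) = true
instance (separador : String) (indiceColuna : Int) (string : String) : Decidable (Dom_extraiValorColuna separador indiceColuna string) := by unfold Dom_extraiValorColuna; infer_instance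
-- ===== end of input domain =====

-- B replaces A's char-by-char accumulating scan (early return at the matching column)
-- by normalize-every-separator-to-EOL + one split + index; objective: idiomatic, not faster.

-- ===== PORT A =====
-- A's for-loop with early return, ported as structural recursion over the characters with
-- the same state (stringTemp, coluna); Python's one-char-string comparison
-- caractere == separador is ported exactly as String.mk [c] = separador.
def extraiValorColunaLoop (separador : String) (indiceColuna : Int) :
    List Char → List Char → Int → Option String
  | [], _, _ => none
  | c :: rest, stringTemp, coluna =>
    if String.mk [c] = separador ∨ c = '\n' then
      (if indiceColuna = coluna then some (String.mk stringTemp)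
       else extraiValorColunaLoop separador indiceColuna rest [] (coluna + 1))
    else extraiValorColunaLoop separador indiceColuna rest (stringTemp ++ [c]) coluna

def extraiValorColuna (separador : String) (indiceColuna : Int) (string : String) : Option String :=
  extraiValorColunaLoop separador indiceColuna string.toList [] 1

-- ===== PORT B =====
-- Source B: map each separator character to '\n', split once on '\n' (Python single-char
-- str.split keeps empty pieces = List.splitOn), drop the unterminated last piece, index.
def extraiValorColuna_alt (separador : String) (indiceColuna : Int) (string : String) : Option String :=
  let normalized : List Char :=
    string.toList.map (fun c => if String.mk [c] = separador then '\n' else c)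
  let fields : List (List Char) := (normalized.splitOn '\n').dropLast
  if 1 ≤ indiceColuna ∧ indiceColuna ≤ (fields.length : Int) then
    some (String.mk (fields.getD (indiceColuna - 1).toNat []))
  else none

-- ===== PRECONDITION & SPEC =====
def Spec_extraiValorColuna (separador : String) (indiceColuna : Int) (string : String) (out : Option String) : Prop := out = extraiValorColuna_alt separador indiceColuna string
instance (separador : String) (indiceColuna : Int) (string : String) (out : Option String) : Decidable (Spec_extraiValorColuna separador indiceColuna string out) := by unfold Spec_extraiValorColuna; infer_instance

-- ===== CLAIM (what is proved, stated in full; the proofs are below) =====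
def Claim_equal_extraiValorColuna : Prop := ∀ (separador : String) (indiceColuna : Int) (string : String), Dom_extraiValorColuna separador indiceColuna string → Spec_extraiValorColuna separador indiceColuna string (extraiValorColuna separador indiceColuna string)

-- ===== LEMMAS AND PROOFS =====

-- the delimiter predicate both programs react to
def pvDelim (separador : String) (c : Char) : Bool :=
  decide (String.mk [c] = separador ∨ c = '\n')

theorem pv_norm_split (separador : String) (cs : List Char) :
    (cs.map (fun c => if String.mk [c] = separador then '\n' else c)).splitOn '\n'
      = cs.splitOnP (pvDelim separador) := by
  induction cs with
  | nil => rfl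
  | cons c cs ih =>
    show List.splitOnP (· == '\n') _ = _
    rw [List.map_cons, List.splitOnP_cons, List.splitOnP_cons]
    by_cases h : String.mk [c] = separador
    · simp [pvDelim, h, ← ih, List.splitOn]
    · by_cases h2 : c = '\n' <;> simp [pvDelim, h, h2, ← ih, List.splitOn]

theorem pv_loop_eq (separador : String) (k : Int) (cs : List Char) :
    ∀ (acc : List Char) (col : Int),
      extraiValorColunaLoop separador k cs acc col
        = (let fs := ((cs.splitOnP (pvDelim separador)).dropLast)
           if col ≤ k ∧ k < col + (fs.length : Int) then
             some (String.mk (if k = col then acc ++ fs.getD 0 []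
                              else fs.getD (k - col).toNat []))
           else none) := by
  induction cs with
  | nil =>
    intro acc col
    have hd : ([[]] : List (List Char)).dropLast = [] := rfl
    simp only [extraiValorColunaLoop, List.splitOnP_nil, hd, List.length_nil,
      Nat.cast_zero, add_zero]
    rw [if_neg (by omega)]
  | cons c cs ih =>
    intro acc col
    have hS := List.splitOnP_ne_nil (pvDelim separador) cs
    rw [List.splitOnP_cons]
    by_cases hp : String.mk [c] = separador ∨ c = '\n'
    · have hd : pvDelim separador c = true := by simpa [pvDelim] using hp
      rw [if_pos hd]
      rw [List.dropLast_cons_of_ne_nil hS]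
      simp only [extraiValorColunaLoop, if_pos hp]
      by_cases hk : k = col
      · rw [if_pos hk]
        simp only [List.length_cons]
        rw [if_pos (by push_cast; omega), if_pos hk]
        simp
      · rw [if_neg hk, ih [] (col + 1)]
        simp only [List.length_cons, List.nil_append, Nat.cast_add, Nat.cast_one]
        split_ifs with h1 h2 h3 h4 h5 <;> try (first | rfl | (exfalso; omega))
        all_goals rw [show (k - col).toNat = (k - (col + 1)).toNat + 1 from by omega,
          List.getD_cons_succ]
        all_goals first
          | rfl
          | rw [show (k - (col + 1)).toNat = 0 from by omega]
    · have hd : ¬ pvDelim separador c = true := by simpa [pvDelim] using hp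
      rw [if_neg hd]
      simp only [extraiValorColunaLoop, if_neg hp]
      rw [ih (acc ++ [c]) col]
      have hmod : (List.modifyHead (List.cons c) (List.splitOnP (pvDelim separador) cs)).dropLast
          = (List.splitOnP (pvDelim separador) cs).dropLast.modifyHead (List.cons c) := by
        rcases List.splitOnP (pvDelim separador) cs with _ | ⟨x, t⟩
        · rfl
        · rcases t with _ | ⟨y, t⟩
          · rfl
          · simp [List.dropLast_cons_of_ne_nil]
      rw [hmod]
      rcases (List.splitOnP (pvDelim separador) cs).dropLast with _ | ⟨z, rest⟩
      · simp only [List.modifyHead_nil, List.length_nil, Nat.cast_zero, add_zero]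
        rw [if_neg (by omega), if_neg (by omega)]
      · simp only [List.modifyHead_cons, List.length_cons, Nat.cast_add, Nat.cast_one]
        by_cases hin : col ≤ k ∧ k < col + ((rest.length : Int) + 1)
        · rw [if_pos hin, if_pos hin]
          by_cases hk : k = col
          · rw [if_pos hk, if_pos hk]
            simp
          · rw [if_neg hk, if_neg hk]
            obtain ⟨m, hm⟩ : ∃ m, (k - col).toNat = m + 1 := ⟨(k - col).toNat - 1, by omega⟩
            rw [hm, List.getD_cons_succ, List.getD_cons_succ]
        · rw [if_neg hin, if_neg hin]

-- ===== VERDICT (by name: the statement is the Claim_ definition above) =====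
theorem extraiValorColuna_spec : Claim_equal_extraiValorColuna := by
  intro sep k s _
  unfold Spec_extraiValorColuna extraiValorColuna extraiValorColuna_alt
  simp only [pv_norm_split, pv_loop_eq]
  by_cases hin : 1 ≤ k ∧ k ≤ (((s.toList.splitOnP (pvDelim sep)).dropLast.length : Int))
  · rw [if_pos (by omega), if_pos hin]
    by_cases hk : k = 1
    · rw [if_pos hk, hk]
      norm_num
    · rw [if_neg hk]
  · rw [if_neg (by omega), if_neg hin]
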